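-- pv_equiv track=rewrite | github.com/Ghostooo/web-app | py_image_classification/classif_tasks.py | check_maxDiff
-- ===== SOURCE A (Python) =====
-- def check_maxDiff(classif_list, max_diff):
--
--     classif_list = [x for x in classif_list if len(x[0]) >= max_diff]
--     segments = {}
--     for i in range(len(classif_list)):
--         if classif_list[i][1] in segments:
--             if classif_list[i][0][0] - segments[classif_list[i][1]][-1] < max_diff:
--                 segments[classif_list[i][1]][-1] = classif_list[i][0][-1]
--             else:
--                 segments[classif_list[i][1]].append(classif_list[i][0][0])
--                 segments[classif_list[i][1]].append(classif_list[i][0][-1])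
--         else:
--             segments[classif_list[i][1]] = [classif_list[i][0][0], classif_list[i][0][-1]]
--     return segments
-- ===== SOURCE B (Python) =====
-- def check_maxDiff(classif_list, max_diff):
--     kept = [x for x in classif_list if len(x[0]) >= max_diff]
--     groups = {}
--     for iv, label in kept:
--         groups.setdefault(label, []).append(iv)
--     segments = {}
--     for label, ivs in groups.items():
--         acc = [ivs[0][0], ivs[0][-1]]
--         for iv in ivs[1:]:
--             if iv[0] - acc[-1] < max_diff:
--                 acc[-1] = iv[-1]
--             else:
--                 acc.append(iv[0])
--                 acc.append(iv[-1])
--         segments[label] = acc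
--     return segments
-- ===== Notes on version B (the rewrite author's own statement) =====
-- stated objective: alternative
-- what changed: B replaces A's single dict pass with conditional in-place edits by a two-phase decomposition: first build an insertion-ordered index label -> list of its intervals, then fold each group's intervals into its merged segment list in a separate pass.
import Mathlib
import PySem

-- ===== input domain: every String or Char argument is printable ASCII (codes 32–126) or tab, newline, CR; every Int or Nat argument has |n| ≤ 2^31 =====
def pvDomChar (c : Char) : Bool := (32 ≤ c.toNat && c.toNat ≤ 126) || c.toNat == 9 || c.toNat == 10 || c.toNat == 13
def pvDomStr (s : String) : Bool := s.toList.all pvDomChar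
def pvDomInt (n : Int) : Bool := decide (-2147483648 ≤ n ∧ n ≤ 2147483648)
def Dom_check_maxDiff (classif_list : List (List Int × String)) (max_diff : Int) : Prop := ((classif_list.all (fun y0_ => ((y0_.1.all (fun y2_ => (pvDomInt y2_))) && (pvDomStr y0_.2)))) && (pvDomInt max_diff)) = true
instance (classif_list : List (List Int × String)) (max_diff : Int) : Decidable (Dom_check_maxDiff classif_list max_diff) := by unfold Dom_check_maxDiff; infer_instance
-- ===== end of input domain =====

-- B restructures A's single conditional dict pass into group-by-label then per-group merge (alternative decomposition, same cost).

-- shared primitive accessors: Python's iv[0] and iv[-1]; Pre_ keeps every accessed list nonempty, so the .getD 0 default is never taken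
def pvH (iv : List Int) : Int := (PySem.List.pyGet? iv 0).getD 0
def pvL (iv : List Int) : Int := (PySem.List.pyGet? iv (-1)).getD 0

-- ===== PORT A =====
def check_maxDiff (classif_list : List (List Int × String)) (max_diff : Int) : List (String × List Int) :=
  let cl := classif_list.filter (fun x => decide (max_diff ≤ (x.1.length : Int)))
  let segments := cl.foldl (fun (segments : PySem.Dict String (List Int)) x =>
    match segments.get? x.2 with
    | some seg =>
        if pvH x.1 - pvL seg < max_diff then
          segments.insert x.2 (seg.dropLast ++ [pvL x.1])      -- segments[label][-1] = x[0][-1]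
        else
          segments.insert x.2 (seg ++ [pvH x.1, pvL x.1])      -- two appends
    | none => segments.insert x.2 [pvH x.1, pvL x.1]) PySem.Dict.empty
  segments.items

-- ===== PORT B =====
-- Source B's per-group merge fold (the [] case is unreachable: every group is nonempty)
def pvMerge (max_diff : Int) (ivs : List (List Int)) : List Int :=
  match ivs with
  | [] => []
  | h :: t => t.foldl (fun acc iv =>
      if pvH iv - pvL acc < max_diff then acc.dropLast ++ [pvL iv]
      else acc ++ [pvH iv, pvL iv]) [pvH h, pvL h]

def check_maxDiff_alt (classif_list : List (List Int × String)) (max_diff : Int) : List (String × List Int) :=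
  let kept := classif_list.filter (fun x => decide (max_diff ≤ (x.1.length : Int)))
  let groups := kept.foldl (fun (g : PySem.Dict String (List (List Int))) x =>
      g.modify x.2 [] (fun v => v ++ [x.1])) PySem.Dict.empty
  let segments := groups.items.foldl (fun (s : PySem.Dict String (List Int)) p =>
      s.insert p.1 (pvMerge max_diff p.2)) PySem.Dict.empty
  segments.items

-- ===== PRECONDITION & SPEC =====
-- Pre_ excludes exactly the inputs where Python A (and B) raise IndexError: an empty interval
-- list that passes the length filter (only possible when max_diff ≤ 0).
def Pre_check_maxDiff (classif_list : List (List Int × String)) (max_diff : Int) : Prop :=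
  ∀ x ∈ classif_list, max_diff ≤ (x.1.length : Int) → x.1 ≠ []
instance (classif_list : List (List Int × String)) (max_diff : Int) : Decidable (Pre_check_maxDiff classif_list max_diff) := by unfold Pre_check_maxDiff; infer_instance
def pvWitness_check_maxDiff : (List (List Int × String)) × Int := ([([1,2],"a"),([4,6],"a"),([9,11],"b")], 2)

def Spec_check_maxDiff (classif_list : List (List Int × String)) (max_diff : Int) (out : List (String × List Int)) : Prop := out = check_maxDiff_alt classif_list max_diff
instance (classif_list : List (List Int × String)) (max_diff : Int) (out : List (String × List Int)) : Decidable (Spec_check_maxDiff classif_list max_diff out) := by unfold Spec_check_maxDiff; infer_instance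

-- ===== CLAIM (what is proved, stated in full; the proofs are below) =====
def Claim_equal_check_maxDiff : Prop := ∀ (classif_list : List (List Int × String)) (max_diff : Int), Dom_check_maxDiff classif_list max_diff → Pre_check_maxDiff classif_list max_diff → Spec_check_maxDiff classif_list max_diff (check_maxDiff classif_list max_diff)

-- ===== LEMMAS AND PROOFS =====

-- A's loop body, seen as a single insert of the new value at key x.2
def pvStepV (max_diff : Int) (o : Option (List Int)) (iv : List Int) : List Int :=
  match o with
  | some seg => if pvH iv - pvL seg < max_diff then seg.dropLast ++ [pvL iv] else seg ++ [pvH iv, pvL iv]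
  | none => [pvH iv, pvL iv]

theorem stepA_eq (max_diff : Int) (d : PySem.Dict String (List Int)) (x : List Int × String) :
    (match d.get? x.2 with
      | some seg =>
          if pvH x.1 - pvL seg < max_diff then d.insert x.2 (seg.dropLast ++ [pvL x.1])
          else d.insert x.2 (seg ++ [pvH x.1, pvL x.1])
      | none => d.insert x.2 [pvH x.1, pvL x.1]) = d.insert x.2 (pvStepV max_diff (d.get? x.2) x.1) := by
  cases h : d.get? x.2
  · rfl
  · simp only [pvStepV]; split <;> rfl

theorem foldA_as_insert (max_diff : Int) (l : List (List Int × String)) (d : PySem.Dict String (List Int)) :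
    l.foldl (fun (segments : PySem.Dict String (List Int)) x =>
      match segments.get? x.2 with
      | some seg =>
          if pvH x.1 - pvL seg < max_diff then segments.insert x.2 (seg.dropLast ++ [pvL x.1])
          else segments.insert x.2 (seg ++ [pvH x.1, pvL x.1])
      | none => segments.insert x.2 [pvH x.1, pvL x.1]) d
    = l.foldl (fun d x => d.insert x.2 (pvStepV max_diff (d.get? x.2) x.1)) d := by
  congr 1; funext d x; exact stepA_eq max_diff d x

theorem foldA_get? (max_diff : Int) (l : List (List Int × String)) (d : PySem.Dict String (List Int)) (c : String) :
    (l.foldl (fun d x => d.insert x.2 (pvStepV max_diff (d.get? x.2) x.1)) d).get? c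
    = ((l.filter (fun x => x.2 == c)).map (fun x => x.1)).foldl (fun o iv => some (pvStepV max_diff o iv)) (d.get? c) := by
  induction l generalizing d with
  | nil => rfl
  | cons x t ih =>
    simp only [List.foldl_cons, ih, List.filter_cons]
    by_cases h : x.2 = c
    · subst h; simp [PySem.Dict.get?_insert_self]
    · have hb : (x.2 == c) = false := by simp [h]
      rw [PySem.Dict.get?_insert_of_ne _ _ (fun hc => h hc.symm)]
      simp [hb]

theorem foldOpt_some (max_diff : Int) (t : List (List Int)) (acc : List Int) :
    t.foldl (fun o iv => some (pvStepV max_diff o iv)) (some acc)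
    = some (t.foldl (fun acc iv =>
        if pvH iv - pvL acc < max_diff then acc.dropLast ++ [pvL iv]
        else acc ++ [pvH iv, pvL iv]) acc) := by
  induction t generalizing acc with
  | nil => rfl
  | cons iv t ih => simp only [List.foldl_cons, ih]; rfl

-- A's per-key result is exactly B's merge of that key's intervals
theorem pv_value (max_diff : Int) (fl : List (List Int)) :
    (fl.foldl (fun o iv => some (pvStepV max_diff o iv)) none).getD []
    = pvMerge max_diff fl := by
  cases fl with
  | nil => rfl
  | cons h t =>
    simp only [List.foldl_cons, pvMerge]
    have : pvStepV max_diff none h = [pvH h, pvL h] := rfl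
    rw [this, foldOpt_some]
    rfl

-- the whole equivalence, from the (shared) filtered list
theorem pv_main (max_diff : Int) (kept : List (List Int × String)) :
    (kept.foldl (fun (segments : PySem.Dict String (List Int)) x =>
      match segments.get? x.2 with
      | some seg =>
          if pvH x.1 - pvL seg < max_diff then segments.insert x.2 (seg.dropLast ++ [pvL x.1])
          else segments.insert x.2 (seg ++ [pvH x.1, pvL x.1])
      | none => segments.insert x.2 [pvH x.1, pvL x.1]) PySem.Dict.empty).items
    = ((kept.foldl (fun (g : PySem.Dict String (List (List Int))) x =>
          g.modify x.2 [] (fun v => v ++ [x.1])) PySem.Dict.empty).items.foldl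
        (fun (s : PySem.Dict String (List Int)) p => s.insert p.1 (pvMerge max_diff p.2)) PySem.Dict.empty).items := by
  rw [foldA_as_insert]
  set dA := kept.foldl (fun d x => d.insert x.2 (pvStepV max_diff (d.get? x.2) x.1)) PySem.Dict.empty with hdA
  set G := kept.foldl (fun (g : PySem.Dict String (List (List Int))) x =>
      g.modify x.2 [] (fun v => v ++ [x.1])) PySem.Dict.empty with hG
  have hAkeys : dA.keys = PySem.Set.update [] (kept.map (fun x => x.2)) := by
    rw [hdA, PySem.Dict.keys_foldl_insert_key kept (fun x => x.2) (fun d x => pvStepV max_diff (d.get? x.2) x.1)]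
    simp
  have hGkeys : G.keys = PySem.Set.update [] (kept.map (fun x => x.2)) := by
    rw [hG, PySem.Dict.keys_foldl_modify_key kept (fun x => x.2) [] (fun g x v => v ++ [x.1])]
    simp
  have hAnodup : dA.keys.Nodup := by
    rw [hdA]; exact PySem.Dict.nodup_keys_foldl_insert_key _ _ _ _ PySem.Dict.nodup_keys_empty
  have hGnodup : G.keys.Nodup := by
    rw [hG]; exact PySem.Dict.nodup_keys_foldl_modify_key _ _ _ _ _ PySem.Dict.nodup_keys_empty
  have hGgetD : ∀ c, G.getD c [] = (kept.filter (fun x => x.2 == c)).map (fun x => x.1) := by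
    intro c
    rw [hG, show (kept.foldl (fun (g : PySem.Dict String (List (List Int))) x =>
          g.modify x.2 [] (fun v => v ++ [x.1])) PySem.Dict.empty)
        = ((kept.map (fun x => (x.2, x.1))).foldl
            (fun (g : PySem.Dict String (List (List Int))) p => g.modify p.1 [] (fun v => v ++ [p.2])) PySem.Dict.empty)
        from (List.foldl_map (f := fun x : List Int × String => (x.2, x.1))
          (g := fun (g : PySem.Dict String (List (List Int))) p => g.modify p.1 [] (fun v => v ++ [p.2]))
          (l := kept) (init := PySem.Dict.empty)).symm]
    rw [PySem.Dict.getD_foldl_modify_append]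
    simp [List.filter_map, List.map_map, Function.comp_def]
  have hAval : ∀ c, dA.getD c [] = pvMerge max_diff ((kept.filter (fun x => x.2 == c)).map (fun x => x.1)) := by
    intro c
    have hg : dA.get? c = ((kept.filter (fun x => x.2 == c)).map (fun x => x.1)).foldl
        (fun o iv => some (pvStepV max_diff o iv)) none := by
      rw [hdA, foldA_get?]; simp
    rw [PySem.Dict.getD_eq_get?_getD, hg, pv_value]
  have hseg : ((G.items.foldl (fun (s : PySem.Dict String (List Int)) p =>
        s.insert p.1 (pvMerge max_diff p.2)) PySem.Dict.empty).items)
      = G.items.map (fun p => (p.1, pvMerge max_diff p.2)) := by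
    have hfresh : ∀ p ∈ G.items, (PySem.Dict.empty : PySem.Dict String (List Int)).contains p.1 = false := by
      intro p _; simp
    have hnd : (G.items.map (fun p => p.1)).Nodup := by
      have := hGnodup; simpa only [PySem.Dict.keys] using this
    rw [PySem.Dict.items_foldl_insert_fresh G.items (fun p => p.1) (fun p => pvMerge max_diff p.2)
        PySem.Dict.empty hfresh hnd]
    simp [PySem.Dict.empty]
  rw [hseg, PySem.Dict.items_eq_map_keys G hGnodup ([] : List (List Int)),
      PySem.Dict.items_eq_map_keys dA hAnodup ([] : List Int), List.map_map, hAkeys, hGkeys]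
  apply List.map_congr_left
  intro k _
  simp only [Function.comp_def]
  rw [hAval k, hGgetD k]

-- ===== VERDICT (by name: the statement is the Claim_ definition above) =====
theorem check_maxDiff_spec : Claim_equal_check_maxDiff := by
  intro cl md _ _
  show check_maxDiff cl md = check_maxDiff_alt cl md
  exact pv_main md (cl.filter (fun x => decide (md ≤ (x.1.length : Int))))
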